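-- pv_equiv track=rewrite | github.com/merryHunter/BDD_Driving_Model | data_prepare/create_command_labels.py | count_turns
-- ===== SOURCE A (Python) =====
-- def count_turns(x,k=2):
--     sign = -1
--     count = 0
--     for i in range(len(x) - k):
--         if x[i+k] > x[i] and abs(x[i+k] - x[i]) >1:
--             if sign != -1:
--                 count += 1
--                 sign = -1
--         elif x[i+k] < x[i]and abs(x[i+k] - x[i]) >1:
--             if sign != 1:
--                 count +=1
--                 sign = 1
--     return count
-- ===== SOURCE B (Python) =====
-- def count_turns(x, k=2):
--     # First pass: collect the significant directions (-1 for a rise, +1 for a fall).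
--     dirs = []
--     for i in range(len(x) - k):
--         d = x[i + k] - x[i]
--         if d > 1:
--             dirs.append(-1)
--         elif d < -1:
--             dirs.append(1)
--     # Second pass: count transitions in dirs, seeded with -1.
--     prev = -1
--     count = 0
--     for s in dirs:
--         if s != prev:
--             count += 1
--             prev = s
--     return count
-- ===== Notes on version B (the rewrite author's own statement) =====
-- stated objective: simpler
-- what changed: Replaces the single stateful loop by a two-pass filter-then-count-transitions decomposition: first build the list of significant directions, then count changes against a running previous value seeded with -1.
import Mathlib
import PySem

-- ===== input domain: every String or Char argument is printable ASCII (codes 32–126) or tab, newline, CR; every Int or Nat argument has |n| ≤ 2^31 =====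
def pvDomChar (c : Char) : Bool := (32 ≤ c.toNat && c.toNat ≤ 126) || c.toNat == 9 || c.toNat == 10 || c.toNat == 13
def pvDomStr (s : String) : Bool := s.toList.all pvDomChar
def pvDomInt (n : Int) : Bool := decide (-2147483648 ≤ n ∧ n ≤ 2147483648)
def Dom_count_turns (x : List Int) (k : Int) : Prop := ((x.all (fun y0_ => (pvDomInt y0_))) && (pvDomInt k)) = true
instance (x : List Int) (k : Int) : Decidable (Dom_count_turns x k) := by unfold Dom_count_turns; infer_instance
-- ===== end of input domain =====

-- B replaces A's single stateful loop by a two-pass filter-then-count-transitions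
-- decomposition (objective: simpler).

-- ===== PORT A =====
-- loop body of A's for-loop over i, state = (sign, count)
def ctStepA (x : List Int) (k : Int) (st : Int × Int) (i : Int) : Int × Int :=
  let a := PySem.List.pyGetD x (i + k) 0
  let b := PySem.List.pyGetD x i 0
  if a > b ∧ |a - b| > 1 then
    (if st.1 ≠ -1 then (-1, st.2 + 1) else st)
  else if a < b ∧ |a - b| > 1 then
    (if st.1 ≠ 1 then (1, st.2 + 1) else st)
  else st

def count_turns (x : List Int) (k : Int) : Int :=
  ((PySem.List.pyRange 0 ((x.length : Int) - k) 1).foldl (ctStepA x k) (-1, 0)).2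

-- ===== PORT B =====
-- loop body of B's first pass: append the significant direction, if any
def ctDir (x : List Int) (k : Int) (acc : List Int) (i : Int) : List Int :=
  let d := PySem.List.pyGetD x (i + k) 0 - PySem.List.pyGetD x i 0
  if d > 1 then acc ++ [-1]
  else if d < -1 then acc ++ [1]
  else acc

-- loop body of B's second pass, state = (prev, count)
def ctTrans (st : Int × Int) (s : Int) : Int × Int :=
  if s ≠ st.1 then (s, st.2 + 1) else st

def count_turns_alt (x : List Int) (k : Int) : Int :=
  let dirs := (PySem.List.pyRange 0 ((x.length : Int) - k) 1).foldl (ctDir x k) []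
  (dirs.foldl ctTrans (-1, 0)).2

-- ===== PRECONDITION & SPEC =====
-- Pre_ excludes k < 0, on which Python A raises IndexError (the loop reaches an index ≥ len(x)).
def Pre_count_turns (x : List Int) (k : Int) : Prop := 0 ≤ k
instance (x : List Int) (k : Int) : Decidable (Pre_count_turns x k) := by unfold Pre_count_turns; infer_instance
def pvWitness_count_turns : List Int × Int := ([1, 4, 2, 0, 5], 2)

def Spec_count_turns (x : List Int) (k : Int) (out : Int) : Prop := out = count_turns_alt x k
instance (x : List Int) (k : Int) (out : Int) : Decidable (Spec_count_turns x k out) := by unfold Spec_count_turns; infer_instance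

-- ===== CLAIM (what is proved, stated in full; the proofs are below) =====
def Claim_equal_count_turns : Prop := ∀ (x : List Int) (k : Int), Dom_count_turns x k → Pre_count_turns x k → Spec_count_turns x k (count_turns x k)

-- ===== LEMMAS AND PROOFS =====

-- one step of A equals folding the (zero-, one-element) direction list of that step
lemma ctStepA_eq (x : List Int) (k : Int) (st : Int × Int) (i : Int) :
    ctStepA x k st i = (ctDir x k [] i).foldl ctTrans st := by
  unfold ctStepA ctDir ctTrans
  dsimp only
  set a := PySem.List.pyGetD x (i + k) 0 with ha
  set b := PySem.List.pyGetD x i 0 with hb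
  by_cases h1 : a - b > 1
  · have hc : (a > b ∧ |a - b| > 1) := ⟨by omega, by rw [abs_of_pos (by omega)]; omega⟩
    rw [if_pos hc, if_pos h1]
    simp only [List.nil_append, List.foldl_cons, List.foldl_nil]
    split_ifs <;> simp_all
  · by_cases h2 : a - b < -1
    · have hne : ¬ (a > b ∧ |a - b| > 1) := by rintro ⟨h, _⟩; omega
      have hc : (a < b ∧ |a - b| > 1) := ⟨by omega, by rw [abs_of_neg (by omega)]; omega⟩
      rw [if_neg hne, if_pos hc, if_neg h1, if_pos h2]
      simp only [List.nil_append, List.foldl_cons, List.foldl_nil]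
      split_ifs <;> simp_all
    · have hle : |a - b| ≤ 1 := abs_le.mpr ⟨by omega, by omega⟩
      have hne1 : ¬ (a > b ∧ |a - b| > 1) := by rintro ⟨_, h'⟩; omega
      have hne2 : ¬ (a < b ∧ |a - b| > 1) := by rintro ⟨_, h'⟩; omega
      rw [if_neg hne1, if_neg hne2, if_neg h1, if_neg h2]
      simp

-- B's first pass distributes over its accumulator
lemma ctDir_acc (x : List Int) (k : Int) (l : List Int) :
    ∀ acc : List Int, l.foldl (ctDir x k) acc = acc ++ l.foldl (ctDir x k) [] := by
  induction l with
  | nil => simp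
  | cons i l ih =>
    intro acc
    have hstep : ∀ a : List Int, ctDir x k a i = a ++ ctDir x k [] i := by
      intro a; unfold ctDir; dsimp only; split_ifs <;> simp
    simp only [List.foldl_cons]
    rw [ih (ctDir x k acc i), ih (ctDir x k [] i), hstep acc, List.append_assoc]

-- folding A's loop body over any index list = folding B's transition counter over B's direction list
lemma fold_eq (x : List Int) (k : Int) (l : List Int) :
    ∀ st : Int × Int, l.foldl (ctStepA x k) st = (l.foldl (ctDir x k) []).foldl ctTrans st := by
  induction l with
  | nil => intro st; simp
  | cons i l ih =>
    intro st
    simp only [List.foldl_cons]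
    rw [ih (ctStepA x k st i), ctDir_acc x k l (ctDir x k [] i), List.foldl_append,
      ctStepA_eq]

-- ===== VERDICT (by name: the statement is the Claim_ definition above) =====
theorem count_turns_spec : Claim_equal_count_turns := by
  intro x k _ _
  unfold Spec_count_turns count_turns count_turns_alt
  rw [fold_eq]
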